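-- pv_equiv track=rewrite | github.com/YTSakura233/nonebot-plugin-maimai-helper | nonebot_plugin_maimai_helper/util/utils.py | find_chara_awakening
-- ===== SOURCE A (Python) =====
-- def find_chara_awakening(all_chara_list, chara_slot_list):
--     """
--     根据角色槽列表，从所有角色列表中找出对应角色的觉醒数。
--
--     :param all_chara_list: 包含所有角色信息的列表，每个元素是一个字典，必须包含"characterId"和"level"键。
--     :param chara_slot_list: 包含角色槽ID的列表，用于查找对应角色的等级。
--     :return: 一个整数列表，表示对应角色槽的角色等级。如果某个角色槽没有对应的角色，则该位置的等级为0。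
--     """
--     # 初始化角色等级列表，长度与chara_slot_list相同
--     character_awakening = [0] * len(chara_slot_list)
--     # {"characterId":101,"point":0,"useCount":2147483647,"level":9999,"nextAwake":0,"nextAwakePercent":0,"awakening":6}
--     # 创建一个角色ID到等级的映射，以提高查找效率
--     chara_id_to_level = {}
--     for chara in all_chara_list:
--         chara_id = chara.get("characterId")
--         awakening = chara.get("awakening")
--         if chara_id is not None and awakening is not None:
--             chara_id_to_level[chara_id] = int(awakening)
--
--     # 使用映射更新角色槽的等级信息
--     for i, chara_slot in enumerate(chara_slot_list):
--         awakening = chara_id_to_level.get(chara_slot)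
--         if awakening is not None:
--             character_awakening[i] = awakening
--
--     return character_awakening
-- ===== SOURCE B (Python) =====
-- def find_chara_awakening(all_chara_list, chara_slot_list):
--     result = []
--     for slot in chara_slot_list:
--         val = 0
--         for chara in all_chara_list:
--             chara_id = chara.get("characterId")
--             awakening = chara.get("awakening")
--             if chara_id is not None and awakening is not None and chara_id == slot:
--                 val = int(awakening)
--         result.append(val)
--     return result
-- ===== Notes on version B (the rewrite author's own statement) =====
-- stated objective: simpler
-- what changed: B drops the precomputed id-to-awakening dict and the preallocated zero list: for each slot it scans the character list directly, keeping the last matching awakening (mirroring dict overwrite) and defaulting to 0.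
import Mathlib
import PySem

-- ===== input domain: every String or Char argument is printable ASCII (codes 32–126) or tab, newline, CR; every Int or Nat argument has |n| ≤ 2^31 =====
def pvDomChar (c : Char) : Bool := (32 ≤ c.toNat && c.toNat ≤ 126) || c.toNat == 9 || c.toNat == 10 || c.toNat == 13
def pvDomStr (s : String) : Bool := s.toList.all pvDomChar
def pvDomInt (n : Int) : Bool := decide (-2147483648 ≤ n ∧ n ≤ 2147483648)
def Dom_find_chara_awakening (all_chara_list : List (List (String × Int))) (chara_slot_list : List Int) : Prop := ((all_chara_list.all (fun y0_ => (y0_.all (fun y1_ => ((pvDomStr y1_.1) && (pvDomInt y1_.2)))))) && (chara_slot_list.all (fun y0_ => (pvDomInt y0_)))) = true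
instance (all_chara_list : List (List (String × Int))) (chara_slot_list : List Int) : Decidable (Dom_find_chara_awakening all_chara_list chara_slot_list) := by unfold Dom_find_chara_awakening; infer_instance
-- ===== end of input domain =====

-- B drops A's precomputed id→awakening dict and preallocated zero list: one direct scan per slot,
-- last matching awakening wins (mirroring dict overwrite), default 0. Objective: simpler.

-- ===== PORT A =====
-- chara.get(k) below: each chara arrives as an association list (dict convention, first match)
def find_chara_awakening (all_chara_list : List (List (String × Int))) (chara_slot_list : List Int) : List Int :=
  let character_awakening : List Int := List.replicate chara_slot_list.length 0
  let chara_id_to_level : PySem.Dict Int Int :=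
    all_chara_list.foldl (fun d chara =>
      match (PySem.Dict.mk chara).get? "characterId", (PySem.Dict.mk chara).get? "awakening" with
      | some chara_id, some awakening => d.insert chara_id awakening   -- int(awakening) is identity on Int
      | _, _ => d) PySem.Dict.empty
  (PySem.List.enumerate chara_slot_list).foldl (fun acc p =>
      match chara_id_to_level.get? p.2 with
      | some awakening => PySem.List.pySetD acc p.1 awakening
      | none => acc) character_awakening

-- ===== PORT B =====
def find_chara_awakening_alt (all_chara_list : List (List (String × Int))) (chara_slot_list : List Int) : List Int :=
  chara_slot_list.map (fun slot =>
    all_chara_list.foldl (fun val chara =>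
      match (PySem.Dict.mk chara).get? "characterId" with
      | none => val
      | some chara_id =>
        match (PySem.Dict.mk chara).get? "awakening" with
        | none => val
        | some awakening => if chara_id = slot then awakening else val) 0)

-- ===== PRECONDITION & SPEC =====
def Spec_find_chara_awakening (all_chara_list : List (List (String × Int))) (chara_slot_list : List Int) (out : List Int) : Prop := out = find_chara_awakening_alt all_chara_list chara_slot_list
instance (all_chara_list : List (List (String × Int))) (chara_slot_list : List Int) (out : List Int) : Decidable (Spec_find_chara_awakening all_chara_list chara_slot_list out) := by unfold Spec_find_chara_awakening; infer_instance

-- ===== CLAIM (what is proved, stated in full; the proofs are below) =====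
def Claim_equal_find_chara_awakening : Prop := ∀ (all_chara_list : List (List (String × Int))) (chara_slot_list : List Int), Dom_find_chara_awakening all_chara_list chara_slot_list → Spec_find_chara_awakening all_chara_list chara_slot_list (find_chara_awakening all_chara_list chara_slot_list)

-- ===== LEMMAS AND PROOFS =====

-- A's dict loop, looked up at a fixed slot, equals B's per-slot accumulator scan.
theorem pv_dict_fold_getD (acl : List (List (String × Int))) (d : PySem.Dict Int Int) (slot : Int) :
    (acl.foldl (fun d chara =>
      match (PySem.Dict.mk chara).get? "characterId", (PySem.Dict.mk chara).get? "awakening" with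
      | some chara_id, some awakening => d.insert chara_id awakening
      | _, _ => d) d).getD slot 0
    = acl.foldl (fun val chara =>
      match (PySem.Dict.mk chara).get? "characterId" with
      | none => val
      | some chara_id =>
        match (PySem.Dict.mk chara).get? "awakening" with
        | none => val
        | some awakening => if chara_id = slot then awakening else val) (d.getD slot 0) := by
  induction acl generalizing d with
  | nil => rfl
  | cons ch t ih =>
    simp only [List.foldl_cons]
    cases h1 : (PySem.Dict.mk ch).get? "characterId" with
    | none => cases h2 : (PySem.Dict.mk ch).get? "awakening" <;> simp [ih]
    | some cid =>
      cases h2 : (PySem.Dict.mk ch).get? "awakening" with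
      | none => simp [ih]
      | some aw =>
        simp only [ih, PySem.Dict.getD_insert]
        congr 1
        by_cases hs : slot = cid
        · simp [hs]
        · rw [if_neg hs, if_neg (fun h => hs h.symm)]

-- A's enumerate/set loop writes exactly the per-slot lookups, in order.
theorem pv_set_loop (d : PySem.Dict Int Int) (cs pre : List Int) :
    (PySem.List.enumerate cs (pre.length : Int)).foldl (fun acc p =>
        match d.get? p.2 with
        | some awakening => PySem.List.pySetD acc p.1 awakening
        | none => acc) (pre ++ List.replicate cs.length 0)
    = pre ++ cs.map (fun s => d.getD s 0) := by
  induction cs generalizing pre with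
  | nil => simp
  | cons s t ih =>
    rw [PySem.List.enumerate_cons]
    simp only [List.foldl_cons, List.length_cons, List.replicate_succ]
    have hset : (match d.get? s with
        | some awakening => PySem.List.pySetD (pre ++ 0 :: List.replicate t.length 0) (pre.length : Int) awakening
        | none => pre ++ 0 :: List.replicate t.length 0)
        = (pre ++ [d.getD s 0]) ++ List.replicate t.length 0 := by
      cases h : d.get? s with
      | none => simp [PySem.Dict.getD_eq_get?_getD, h]
      | some v =>
        simp only [PySem.Dict.getD_eq_get?_getD, h, Option.getD_some]
        rw [PySem.List.pySetD_natCast, List.set_append]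
        simp
    rw [hset]
    have hlen : ((pre.length : Int) + 1) = (((pre ++ [d.getD s 0]).length : Nat) : Int) := by
      simp
    rw [hlen, ih (pre ++ [d.getD s 0])]
    simp

-- ===== VERDICT (by name: the statement is the Claim_ definition above) =====
theorem find_chara_awakening_spec : Claim_equal_find_chara_awakening := by
  intro acl cs _
  show find_chara_awakening acl cs = find_chara_awakening_alt acl cs
  unfold find_chara_awakening find_chara_awakening_alt
  have := pv_set_loop (acl.foldl (fun d chara =>
      match (PySem.Dict.mk chara).get? "characterId", (PySem.Dict.mk chara).get? "awakening" with
      | some chara_id, some awakening => d.insert chara_id awakening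
      | _, _ => d) PySem.Dict.empty) cs []
  simp only [List.length_nil, Int.natCast_zero, List.nil_append] at this
  rw [this]
  refine List.map_congr_left (fun s _ => ?_)
  rw [pv_dict_fold_getD]
  simp [PySem.Dict.getD_empty]
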